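-- pv_equiv track=rewrite | github.com/charriry/leetcode | 移除相邻字符.py | resultingString
-- ===== SOURCE A (Python) =====
-- def resultingString(s: str) -> str:
--     i = 0
--     result = ""
--     n = len(s)
--     j = i+1
--     while i<n and j<n:
--         if abs(ord(s[i])-ord(s[j]))==1 or abs(ord(s[i])-ord(s[j]))==25:
--             if j == n-1:
--                 return result
--             m = len(result)
--             result = result[:m-1]
--             s = s[:i]+s[j+1:]
--             i = max(i-1,0)
--             j = i+1
--             n = len(s)
--         else:
--             result += s[i]
--             if j == n-1:
--                 result += s[j]
--             i += 1
--             j += 1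
--     if len(s) <= 1:
--         return s
--
--     return result
-- ===== SOURCE B (Python) =====
-- def resultingString(s: str) -> str:
--     st = []
--     for c in s:
--         if st and abs(ord(st[-1]) - ord(c)) in (1, 25):
--             st.pop()
--         else:
--             st.append(c)
--     return "".join(st)
-- ===== Notes on version B (the rewrite author's own statement) =====
-- stated objective: faster
-- what changed: Replaced A's index-rewinding loop that rebuilds the string with slicing after every removal by a single left-to-right pass over a stack that pops when the top is an alphabet-neighbor of the current char.
import Mathlib
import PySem

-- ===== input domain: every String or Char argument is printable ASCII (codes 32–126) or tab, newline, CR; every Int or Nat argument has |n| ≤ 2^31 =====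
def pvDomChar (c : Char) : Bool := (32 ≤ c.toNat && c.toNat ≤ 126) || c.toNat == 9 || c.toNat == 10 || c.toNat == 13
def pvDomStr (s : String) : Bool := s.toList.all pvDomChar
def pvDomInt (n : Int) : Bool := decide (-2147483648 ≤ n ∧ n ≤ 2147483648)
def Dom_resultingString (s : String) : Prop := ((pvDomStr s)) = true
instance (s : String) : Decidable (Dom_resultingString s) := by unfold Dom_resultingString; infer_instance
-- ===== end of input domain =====

-- B replaces A's O(n^2) index-rewinding loop (re-slicing the string after each removal)
-- by a single O(n) stack pass; equal return value proved on all inputs (A is total).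

-- abs(ord(a)-ord(b)) == 1 or abs(ord(a)-ord(b)) == 25
def neighborChar (a b : Char) : Bool :=
  ((a.toNat : Int) - (b.toNat : Int)).natAbs == 1 ||
  ((a.toNat : Int) - (b.toNat : Int)).natAbs == 25

-- ===== PORT A =====
-- A's while loop; the invariant j = i + 1 of A's code is kept implicit (j is always i+1
-- at the loop head).  Indices i are ≥ 0 throughout (max(i-1,0) = Nat subtraction), and
-- s[i], s[i+1] are read under the in-range guard, so getD is exact here.
-- result[:len(result)-1] = dropLast (also for empty result), s[:i]+s[j+1:] = take/drop.
def resultingStringLoop (s : List Char) (i : Nat) (result : List Char) : List Char :=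
  if _h : i + 1 < s.length then
    if neighborChar (s.getD i default) (s.getD (i+1) default) then
      if i + 1 = s.length - 1 then result
      else resultingStringLoop (s.take i ++ s.drop (i+2)) (i - 1) result.dropLast
    else
      resultingStringLoop s (i+1)
        (result ++ [s.getD i default] ++
          (if i + 1 = s.length - 1 then [s.getD (i+1) default] else []))
  else if s.length ≤ 1 then s else result
termination_by 2 * s.length - i
decreasing_by
  · simp only [List.length_append, List.length_take, List.length_drop]; omega
  · omega

def resultingString (s : String) : String :=
  String.ofList (resultingStringLoop s.toList 0 [])

-- ===== PORT B =====
-- the body of B's for-loop: pop when the stack top is an alphabet neighbor, else push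
def stackStep (st : List Char) (c : Char) : List Char :=
  if !st.isEmpty && neighborChar st.getLast! c then st.dropLast else st ++ [c]

def resultingString_alt (s : String) : String :=
  String.ofList (s.toList.foldl stackStep [])

-- ===== PRECONDITION & SPEC =====
def Spec_resultingString (s : String) (out : String) : Prop := out = resultingString_alt s
instance (s : String) (out : String) : Decidable (Spec_resultingString s out) := by unfold Spec_resultingString; infer_instance

-- ===== CLAIM (what is proved, stated in full; the proofs are below) =====
def Claim_equal_resultingString : Prop := ∀ (s : String), Dom_resultingString s → Spec_resultingString s (resultingString s)

-- ===== LEMMAS AND PROOFS =====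

-- no adjacent neighbor pair among the first n positions of s
def NoPairBelow (s : List Char) (n : Nat) : Prop :=
  ∀ k, k + 1 < n → (h : k + 1 < s.length) →
    neighborChar (s[k]'(by omega)) (s[k+1]'h) = false

lemma stackStep_nil (c : Char) : stackStep [] c = [c] := by
  simp [stackStep]

lemma stackStep_concat_push (l : List Char) (a b : Char) (h : neighborChar a b = false) :
    stackStep (l ++ [a]) b = (l ++ [a]) ++ [b] := by
  simp [stackStep, h]

lemma stackStep_concat_pop (l : List Char) (a b : Char) (h : neighborChar a b = true) :
    stackStep (l ++ [a]) b = l := by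
  simp [stackStep, h]

lemma take_succ_eq (s : List Char) (i : Nat) (h : i < s.length) :
    s.take (i+1) = s.take i ++ [s[i]] := by
  rw [List.take_add_one, List.getElem?_eq_getElem h]
  rfl

-- push onto the stack s.take i : legal because positions i-1, i are not neighbors
lemma stackStep_take (s : List Char) (i : Nat) (hi : i < s.length)
    (hnp : NoPairBelow s (i+1)) :
    stackStep (s.take i) (s[i]) = s.take i ++ [s[i]] := by
  cases i with
  | zero => simp [stackStep_nil]
  | succ j =>
      rw [take_succ_eq s j (by omega)]
      exact stackStep_concat_push _ _ _ (hnp j (by omega) hi)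

-- the main loop invariant: A's loop from state (s, i, result) with result = s.take i and
-- no neighbor pair among the first i+1 chars returns B's stack fold of the rest of s
lemma loop_eq_fold : ∀ (m : Nat) (s : List Char) (i : Nat) (result : List Char),
    2 * s.length - i ≤ m →
    result = s.take i →
    NoPairBelow s (i+1) →
    (i + 1 < s.length ∨ s.length ≤ i ∨ s.length ≤ 1) →
    resultingStringLoop s i result = List.foldl stackStep result (s.drop i) := by
  intro m
  induction m using Nat.strong_induction_on with
  | _ m ih =>
  intro s i result hm hres hnp hside
  rw [resultingStringLoop]
  by_cases hg : i + 1 < s.length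
  · have hi : i < s.length := by omega
    rw [dif_pos hg, List.getD_eq_getElem s default hi, List.getD_eq_getElem s default hg]
    have hdrop : s.drop i = s[i] :: s[i+1] :: s.drop (i+2) := by
      rw [List.drop_eq_getElem_cons hi, List.drop_eq_getElem_cons hg]
    by_cases hnb : neighborChar s[i] s[i+1]
    · rw [if_pos hnb]
      by_cases hlast : i + 1 = s.length - 1
      · -- removal of the final pair: A returns result; B's fold pushes s[i] then pops it
        rw [if_pos hlast, hdrop]
        have h2 : s.drop (i+2) = [] := by
          apply List.drop_eq_nil_of_le; omega
        rw [h2]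
        simp only [List.foldl_cons, List.foldl_nil]
        rw [hres, stackStep_take s i hi hnp, stackStep_concat_pop _ _ _ hnb]
      · -- removal in the middle: recurse on the shortened string
        rw [if_neg hlast]
        have hlen' : (s.take i ++ s.drop (i+2)).length = s.length - 2 := by
          simp only [List.length_append, List.length_take, List.length_drop]; omega
        have htk : (s.take i ++ s.drop (i+2)).take (i-1) = s.take (i-1) := by
          rw [List.take_append_of_le_length (by simp; omega), List.take_take]
          congr 1; omega
        have hdl : result.dropLast = s.take (i-1) := by
          subst hres
          cases i with
          | zero => simp
          | succ j =>
              rw [take_succ_eq s j (by omega), List.dropLast_concat]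
              simp
        rw [ih (2 * (s.take i ++ s.drop (i+2)).length - (i-1)) (by omega)
              _ _ _ le_rfl (by rw [hdl, htk])
              (by intro k hk hk2
                  have hklt : k + 1 < i := by omega
                  have hkl : k + 1 < (s.take i).length := by simp; omega
                  rw [List.getElem_append_left (by omega), List.getElem_append_left hkl,
                      List.getElem_take, List.getElem_take]
                  exact hnp k (by omega) (by omega))
              (by omega)]
        rw [hdl]
        cases Nat.eq_zero_or_pos i with
        | inl hz =>
            subst hz
            simp only [Nat.zero_sub, List.take_zero, List.drop_zero, List.nil_append, hdrop]
            subst hres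
            simp only [List.take_zero, List.foldl_cons]
            rw [stackStep_nil, show [s[0]] = ([] : List Char) ++ [s[0]] from rfl]
            rw [stackStep_concat_pop [] _ _ hnb]
        | inr hpos =>
            have hdrop' : (s.take i ++ s.drop (i+2)).drop (i-1) = s[i-1] :: s.drop (i+2) := by
              rw [List.drop_append_of_le_length (by simp; omega)]
              have : s.take i = s.take (i-1) ++ [s[i-1]] := by
                have := take_succ_eq s (i-1) (by omega)
                simpa [Nat.sub_add_cancel hpos] using this
              rw [this, List.drop_left' (by simp; omega)]
              rfl
            rw [hdrop', hdrop]
            simp only [List.foldl_cons]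
            have hpush1 : stackStep (s.take (i-1)) s[i-1] = s.take (i-1) ++ [s[i-1]] := by
              have := stackStep_take s (i-1) (by omega) (by
                intro k hk hk2; exact hnp k (by omega) hk2)
              simpa using this
            have htake : s.take (i-1) ++ [s[i-1]] = s.take i := by
              have := take_succ_eq s (i-1) (by omega)
              rw [← this]; congr 1; omega
            rw [hpush1, htake, hres, stackStep_take s i hi hnp,
                stackStep_concat_pop _ _ _ hnb]
    · rw [if_neg hnb]
      have hnb' : neighborChar s[i] s[i+1] = false := by
        simpa using hnb
      by_cases hlast : i + 1 = s.length - 1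
      · -- last comparison: A appends both chars and the loop then exits
        rw [if_pos hlast, resultingStringLoop]
        rw [dif_neg (by omega), if_neg (by omega)]
        rw [hdrop, List.drop_eq_nil_of_le (by omega)]
        simp only [List.foldl_cons, List.foldl_nil]
        rw [hres, stackStep_take s i hi hnp, stackStep_concat_push _ _ _ hnb']
      · rw [if_neg hlast]
        rw [ih (2 * s.length - (i+1)) (by omega) _ _ _ le_rfl
              (by rw [hres, List.append_nil, ← take_succ_eq s i hi])
              (by intro k hk hk2
                  rcases Nat.lt_or_ge (k+1) (i+1) with hlt | hge
                  · exact hnp k hlt hk2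
                  · have : k = i := by omega
                    subst this; exact hnb')
              (by omega)]
        rw [hres, List.append_nil, hdrop, List.drop_eq_getElem_cons hg]
        simp only [List.foldl_cons]
        rw [stackStep_take s i hi hnp, ← take_succ_eq s i hi]
  · rw [dif_neg hg]
    have hle : s.length ≤ i ∨ s.length ≤ 1 := by
      rcases hside with h | h | h
      · omega
      · exact Or.inl h
      · exact Or.inr h
    by_cases h1 : s.length ≤ 1
    · rw [if_pos h1]
      cases Nat.eq_zero_or_pos i with
      | inl hz =>
          subst hz
          rw [hres]
          match s, h1 with
          | [], _ => rfl
          | [c], _ => simp [stackStep_nil]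
      | inr hpos =>
          rw [hres, List.take_of_length_le (by omega), List.drop_eq_nil_of_le (by omega)]
          rfl
    · rw [if_neg h1]
      have hle' : s.length ≤ i := by omega
      rw [List.drop_eq_nil_of_le hle']
      rfl

theorem resultingString_eq_alt (s : String) : resultingString s = resultingString_alt s := by
  unfold resultingString resultingString_alt
  congr 1
  have h := loop_eq_fold (2 * s.toList.length) s.toList 0 [] (by omega) (by simp)
    (by intro k hk _; omega) (by by_cases h : s.toList.length ≤ 1 <;> omega)
  simpa using h

-- ===== VERDICT (by name: the statement is the Claim_ definition above) =====
theorem resultingString_spec : Claim_equal_resultingString := by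
  intro s _
  unfold Spec_resultingString
  exact resultingString_eq_alt s
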